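-- pv_equiv track=rewrite | github.com/SatoshiReport/ci_shared | ci_tools/scripts/unused_module_guard.py | _check_parent_imported
-- ===== SOURCE A (Python) =====
-- from typing import Dict, List, Optional, Set, Tuple
--
-- def _has_specific_child_imports(
--     parent: str, module_name: str, all_imports: Set[str]
-- ) -> bool:
--     """Check if parent has specific child imports that exclude this module."""
--     return any(
--         imp.startswith(parent + ".") and imp != module_name for imp in all_imports
--     )
--
-- def _check_parent_imported(module_name: str, all_imports: Set[str]) -> bool:
--     """Check if a parent module is imported wholesale."""
--     module_parts = module_name.split(".")
--     for i in range(len(module_parts) - 1):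
--         parent = ".".join(module_parts[: i + 1])
--         if parent in all_imports or f"src.{parent}" in all_imports:
--             if not _has_specific_child_imports(parent, module_name, all_imports):
--                 return True
--     return False
-- ===== SOURCE B (Python) =====
-- def _check_parent_imported(module_name, all_imports):
--     """Check if a parent module is imported wholesale.
--
--     Because the candidate parents are nested prefixes, the set of parents
--     excluded by a more specific child import is always the first `deepest`
--     of them; so one pass computes that single depth plus the set of
--     imported names (with 'src.'-stripped aliases), and the answer is
--     whether any parent past that depth was imported.
--     """
--     parts = module_name.split(".")
--     prefixes = []
--     acc = None
--     for part in parts[:-1]: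
--         acc = part if acc is None else acc + "." + part
--         prefixes.append(acc)
--     deepest = 0
--     imported = set()
--     for imp in all_imports:
--         if imp != module_name:
--             d = 0
--             for p in prefixes:
--                 if imp.startswith(p + "."):
--                     d += 1
--                 else:
--                     break
--             if d > deepest:
--                 deepest = d
--         imported.add(imp)
--         if imp.startswith("src."):
--             imported.add(imp[4:])
--     return any(p in imported for p in prefixes[deepest:])
-- ===== Notes on version B (the rewrite author's own statement) =====
-- stated objective: alternative
-- what changed: A rescans all_imports twice per candidate parent (membership plus an any() over child imports); B exploits that the candidates are nested prefixes, so the child-blocked parents are exactly the first `deepest` of them: one classifying pass computes that single depth and the set of imported names (with 'src.'-stripped aliases), and the answer is a lookup over the parents past that depth.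
import Mathlib
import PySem

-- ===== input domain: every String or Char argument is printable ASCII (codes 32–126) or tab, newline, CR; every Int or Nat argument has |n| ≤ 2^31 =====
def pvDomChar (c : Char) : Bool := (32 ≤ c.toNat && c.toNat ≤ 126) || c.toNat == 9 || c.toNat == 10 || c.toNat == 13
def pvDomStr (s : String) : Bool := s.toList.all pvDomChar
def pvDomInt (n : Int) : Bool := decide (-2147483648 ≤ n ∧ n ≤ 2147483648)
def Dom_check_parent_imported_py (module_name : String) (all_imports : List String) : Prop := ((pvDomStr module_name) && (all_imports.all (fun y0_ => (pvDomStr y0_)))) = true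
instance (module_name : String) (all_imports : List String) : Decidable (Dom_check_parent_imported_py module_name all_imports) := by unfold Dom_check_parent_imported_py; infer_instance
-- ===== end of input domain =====

-- B replaces A's per-parent rescans of the imports by one pass computing a single deepest blocked
-- depth (sound because the candidate parents are nested prefixes) plus a set of imported names;
-- same return value everywhere ('alternative', not claimed faster).
-- ===== PORT A =====
def hasSpecificChildImports_py (parent : String) (module_name : String) (all_imports : List String) : Bool :=
  all_imports.any (fun imp => PySem.Str.startswith imp (parent ++ ".") && imp != module_name)

def check_parent_imported_py (module_name : String) (all_imports : List String) : Bool :=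
  let module_parts := (PySem.Str.split? module_name ".").getD []
  (PySem.List.pyRange 0 ((module_parts.length : Int) - 1) 1).any (fun i =>
    let parent := PySem.Str.join "." (PySem.List.slice module_parts none (some (i + 1)))
    (all_imports.contains parent || all_imports.contains ("src." ++ parent)) &&
      !hasSpecificChildImports_py parent module_name all_imports)

-- ===== PORT B =====
-- the incremental-prefix loop body ('acc = part if acc is None else acc + "." + part; prefixes.append(acc)')
def pvPrefStep (st : List String × Option String) (part : String) : List String × Option String :=
  let acc := match st.2 with | none => part | some a => a ++ "." ++ part
  (st.1 ++ [acc], some acc)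

-- the inner 'for p in prefixes: if imp.startswith(p + "."): d += 1 else: break' (flag = broken)
def pvDCount (imp : String) (prefixes : List String) : Int :=
  (prefixes.foldl (fun (s : Int × Bool) p =>
      if s.2 then s
      else if PySem.Str.startswith imp (p ++ ".") then (s.1 + 1, false)
      else (s.1, true)) (0, false)).1

-- one iteration of B's single classifying pass over all_imports
def pvScanStep (module_name : String) (prefixes : List String) (st : Int × PySem.Set String) (imp : String) : Int × PySem.Set String :=
  let deepest :=
    if imp != module_name then
      let d := pvDCount imp prefixes
      if d > st.1 then d else st.1
    else st.1
  let imported := PySem.Set.add st.2 imp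
  let imported := if PySem.Str.startswith imp "src." then PySem.Set.add imported (PySem.Str.slice imp (some 4) none) else imported
  (deepest, imported)

def check_parent_imported_py_alt (module_name : String) (all_imports : List String) : Bool :=
  let parts := (PySem.Str.split? module_name ".").getD []
  let prefixes := ((PySem.List.slice parts none (some (-1))).foldl pvPrefStep ([], none)).1
  let st := all_imports.foldl (pvScanStep module_name prefixes) (0, PySem.Set.empty)
  (PySem.List.slice prefixes (some st.1) none).any (fun p => PySem.Set.contains st.2 p)

-- ===== PRECONDITION & SPEC =====
def Spec_check_parent_imported_py (module_name : String) (all_imports : List String) (out : Bool) : Prop := out = check_parent_imported_py_alt module_name all_imports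
instance (module_name : String) (all_imports : List String) (out : Bool) : Decidable (Spec_check_parent_imported_py module_name all_imports out) := by unfold Spec_check_parent_imported_py; infer_instance

-- ===== CLAIM =====
def Claim_equal_check_parent_imported_py : Prop := ∀ (module_name : String) (all_imports : List String), Dom_check_parent_imported_py module_name all_imports → Spec_check_parent_imported_py module_name all_imports (check_parent_imported_py module_name all_imports)

-- ===== LEMMAS AND PROOFS =====

def pvChain (a : String) : List String → List String
  | [] => []
  | y :: t => (a ++ "." ++ y) :: pvChain (a ++ "." ++ y) t

theorem pv_chars_glue (a y : List Char) (l : List (List Char)) :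
    PySem.Chars.join ['.'] ((a ++ '.' :: y) :: l) = a ++ '.' :: PySem.Chars.join ['.'] (y :: l) := by
  cases l <;> simp [PySem.Chars.join_singleton, PySem.Chars.join_cons_cons]

theorem pv_chain_eq (ys : List String) (a : String) :
    pvChain a ys = (List.range ys.length).map (fun i => PySem.Str.join "." (a :: ys.take (i + 1))) := by
  induction ys generalizing a with
  | nil => simp [pvChain]
  | cons y t ih =>
    rw [pvChain, ih]
    simp only [List.length_cons, List.range_succ_eq_map, List.map_cons, List.map_map]
    refine List.cons_eq_cons.mpr ⟨?_, ?_⟩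
    · exact (String.toList_inj.mp (by simp [PySem.Str.toList_join, PySem.Chars.join_cons_cons, PySem.Chars.join_singleton])).symm
    · apply List.map_congr_left
      intro i hi
      simp only [Function.comp_apply, Nat.succ_eq_add_one, List.take_succ_cons]
      exact (String.toList_inj.mp (by simp [PySem.Str.toList_join, PySem.Chars.join_cons_cons, pv_chars_glue])).symm


theorem pv_fold_some (ys : List String) (out : List String) (a : String) :
    (ys.foldl pvPrefStep (out, some a)).1 = out ++ pvChain a ys := by
  induction ys generalizing out a with
  | nil => simp [pvChain]
  | cons y t ih => simp [pvPrefStep, pvChain, ih, List.append_assoc]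

def pvF (parts : List String) (j : Nat) : String := PySem.Str.join "." (parts.take (j + 1))

theorem pv_prefixes_eq (parts : List String) :
    ((PySem.List.slice parts none (some (-1))).foldl pvPrefStep ([], none)).1
      = (List.range (parts.length - 1)).map (pvF parts) := by
  rw [PySem.List.slice_to_neg_one]
  cases parts with
  | nil => simp
  | cons q0 rest =>
    cases rest with
    | nil => simp
    | cons r t =>
      rw [List.dropLast_cons₂, List.foldl_cons]
      show (((r :: t).dropLast).foldl pvPrefStep ([q0], some q0)).1 = _
      rw [pv_fold_some, pv_chain_eq]
      have hlen : (q0 :: r :: t).length - 1 = ((r :: t).length - 1) + 1 := by simp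
      rw [hlen, List.range_succ_eq_map, List.map_cons, List.map_map]
      refine List.cons_eq_cons.mpr ⟨?_, ?_⟩
      · simp [pvF]
        exact (String.toList_inj.mp (by simp [PySem.Str.toList_join, PySem.Chars.join_singleton])).symm
      · simp only [List.length_dropLast]
        apply List.map_congr_left
        intro i hi
        simp only [Function.comp_apply, pvF, List.take_succ_cons]
        congr 2
        rw [List.dropLast_eq_take, List.take_take]
        simp at hi
        have hm : min (i + 1) ((r :: t).length - 1) = i + 1 := by
          simp only [List.length_cons]; omega
        rw [hm, List.take_succ_cons]

theorem pv_chars_join_snoc (y : List Char) (ls : List (List Char)) (h : ls ≠ []) :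
    PySem.Chars.join ['.'] (ls ++ [y]) = PySem.Chars.join ['.'] ls ++ '.' :: y := by
  induction ls with
  | nil => exact absurd rfl h
  | cons x t ih =>
    cases t with
    | nil => simp [PySem.Chars.join_singleton, PySem.Chars.join_cons_cons]
    | cons z u =>
      have h1 : (z :: u) ++ [y] = z :: (u ++ [y]) := rfl
      show PySem.Chars.join ['.'] (x :: ((z :: u) ++ [y])) = _
      rw [h1, PySem.Chars.join_cons_cons, ← h1, ih (by simp), PySem.Chars.join_cons_cons]
      simp

theorem pv_join_take_succ (parts : List String) (j : Nat) (h : j + 1 < parts.length) :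
    pvF parts (j + 1) = pvF parts j ++ "." ++ parts[j + 1] := by
  apply String.toList_inj.mp
  unfold pvF
  rw [List.take_succ_eq_append_getElem h]
  simp only [PySem.Str.toList_join, List.map_append, List.map_cons, List.map_nil,
    String.toList_append]
  have hne : parts ≠ [] := by intro h0; subst h0; simp at h
  rw [show (".":String).toList = ['.'] from rfl,
    pv_chars_join_snoc _ _ (by simp [List.take_eq_nil_iff, hne])]
  simp

theorem pv_pref_mono (parts : List String) (i j : Nat) (hij : i ≤ j) (hj : j + 1 ≤ parts.length) :
    (pvF parts i ++ ".").toList <+: (pvF parts j ++ ".").toList := by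
  induction j with
  | zero => cases Nat.le_zero.mp hij; exact List.prefix_refl _
  | succ k ih =>
    rcases Nat.lt_or_ge i (k + 1) with hlt | hge
    · refine (ih (by omega) (by omega)).trans ?_
      rw [pv_join_take_succ parts k (by omega)]
      simp only [String.toList_append]
      exact (List.prefix_append _ _).trans (List.prefix_append _ _)
    · have : i = k + 1 := by omega
      subst this; exact List.prefix_refl _


theorem pv_dcount_stopped (imp : String) (l : List String) (c : Int) :
    (l.foldl (fun (s : Int × Bool) p =>
      if s.2 then s
      else if PySem.Str.startswith imp (p ++ ".") then (s.1 + 1, false)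
      else (s.1, true)) (c, true)) = (c, true) := by
  induction l with
  | nil => rfl
  | cons x t ih => simpa using ih

theorem pv_dcount_run (imp : String) (l : List String) (c : Int) :
    (l.foldl (fun (s : Int × Bool) p =>
      if s.2 then s
      else if PySem.Str.startswith imp (p ++ ".") then (s.1 + 1, false)
      else (s.1, true)) (c, false)).1
    = c + ((l.takeWhile (fun p => PySem.Str.startswith imp (p ++ "."))).length : Int) := by
  induction l generalizing c with
  | nil => simp
  | cons x t ih =>
    rw [List.foldl_cons, List.takeWhile_cons]
    by_cases hx : PySem.Str.startswith imp (x ++ ".") = true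
    · simp only [Bool.false_eq_true, if_false, hx, if_true, ih]
      simp; ring
    · rw [if_neg (by simp), if_neg hx, pv_dcount_stopped]
      simp only [PySem.Str.startswith_eq, String.toList_append,
        show (".":String).toList = ['.'] from rfl] at hx
      simp [hx]

theorem pv_dcount_eq (imp : String) (prefixes : List String) :
    pvDCount imp prefixes
      = ((prefixes.takeWhile (fun p => PySem.Str.startswith imp (p ++ "."))).length : Int) := by
  unfold pvDCount
  rw [pv_dcount_run]
  simp

theorem pv_takeWhile_mem (l : List String) (cond : String → Bool)
    (hmono : ∀ i j (hij : i ≤ j) (hj : j < l.length), cond l[j] = true → cond (l[i]'(lt_of_le_of_lt hij hj)) = true)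
    (i : Nat) (hi : i < l.length) :
    i < (l.takeWhile cond).length ↔ cond l[i] = true := by
  rw [List.takeWhile_eq_take_findIdx_not, List.length_take]
  constructor
  · intro h
    have h1 : i < List.findIdx (fun a => !cond a) l := lt_of_lt_of_le h (min_le_left _ _)
    simpa using List.not_of_lt_findIdx h1
  · intro hc
    have h2 : i < List.findIdx (fun a => !cond a) l := by
      rw [List.lt_findIdx_iff]
      exact ⟨hi, fun j hj => by simpa using hmono j i hj hi hc⟩
    omega


theorem pv_scan_fst (m : String) (prefixes : List String) (imps : List String)
    (d0 : Int) (s0 : PySem.Set String) (z : Int) :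
    z < (imps.foldl (pvScanStep m prefixes) (d0, s0)).1
      ↔ z < d0 ∨ ∃ imp ∈ imps, imp ≠ m ∧ z < pvDCount imp prefixes := by
  induction imps generalizing d0 s0 with
  | nil => simp
  | cons x t ih =>
    rw [List.foldl_cons]
    show z < (t.foldl (pvScanStep m prefixes) (pvScanStep m prefixes (d0, s0) x)).1 ↔ _
    have hstep : (pvScanStep m prefixes (d0, s0) x) =
        ((if x ≠ m then (if pvDCount x prefixes > d0 then pvDCount x prefixes else d0) else d0),
         (pvScanStep m prefixes (d0, s0) x).2) := by
      unfold pvScanStep; simp only [bne_iff_ne]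
    rw [hstep, ih]
    by_cases hx : x = m
    · simp [hx]
    · simp only [if_pos hx, List.mem_cons]
      constructor
      · rintro (h | ⟨imp, hmem, hne, hlt⟩)
        · split_ifs at h with hgt
          · exact Or.inr ⟨x, Or.inl rfl, hx, h⟩
          · exact Or.inl h
        · exact Or.inr ⟨imp, Or.inr hmem, hne, hlt⟩
      · rintro (h | ⟨imp, (rfl | hmem), hne, hlt⟩)
        · left; split_ifs with hgt; omega; exact h
        · left; split_ifs with hgt; exact hlt; omega
        · exact Or.inr ⟨imp, hmem, hne, hlt⟩

theorem pv_scan_snd (m : String) (prefixes : List String) (imps : List String)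
    (d0 : Int) (s0 : PySem.Set String) (p : String) :
    p ∈ (imps.foldl (pvScanStep m prefixes) (d0, s0)).2
      ↔ p ∈ s0 ∨ ∃ imp ∈ imps, imp = p ∨
          (PySem.Str.startswith imp "src." = true ∧ PySem.Str.slice imp (some 4) none = p) := by
  induction imps generalizing d0 s0 with
  | nil => simp
  | cons x t ih =>
    rw [List.foldl_cons]
    show p ∈ (t.foldl (pvScanStep m prefixes) (pvScanStep m prefixes (d0, s0) x)).2 ↔ _
    have hstep : (pvScanStep m prefixes (d0, s0) x) =
        ((pvScanStep m prefixes (d0, s0) x).1,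
          if PySem.Str.startswith x "src." = true then
            PySem.Set.add (PySem.Set.add s0 x) (PySem.Str.slice x (some 4) none)
          else PySem.Set.add s0 x) := by
      unfold pvScanStep; split_ifs <;> simp_all
    rw [hstep, ih]
    simp only [List.mem_cons]
    by_cases hs : PySem.Str.startswith x "src." = true
    · simp only [if_pos hs, PySem.Set.mem_add]
      constructor
      · rintro (((h | rfl) | rfl) | ⟨imp, hmem, hor⟩)
        · exact Or.inl h
        · exact Or.inr ⟨p, Or.inl rfl, Or.inl rfl⟩
        · exact Or.inr ⟨x, Or.inl rfl, Or.inr ⟨hs, rfl⟩⟩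
        · exact Or.inr ⟨imp, Or.inr hmem, hor⟩
      · rintro (h | ⟨imp, (rfl | hmem), (rfl | ⟨hsw, rfl⟩)⟩)
        · exact Or.inl (Or.inl (Or.inl h))
        · exact Or.inl (Or.inl (Or.inr rfl))
        · exact Or.inl (Or.inr rfl)
        · exact Or.inr ⟨imp, hmem, Or.inl rfl⟩
        · exact Or.inr ⟨imp, hmem, Or.inr ⟨hsw, rfl⟩⟩
    · simp only [if_neg hs, PySem.Set.mem_add]
      constructor
      · rintro ((h | rfl) | ⟨imp, hmem, hor⟩)
        · exact Or.inl h
        · exact Or.inr ⟨p, Or.inl rfl, Or.inl rfl⟩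
        · exact Or.inr ⟨imp, Or.inr hmem, hor⟩
      · rintro (h | ⟨imp, (rfl | hmem), (rfl | ⟨hsw, rfl⟩)⟩)
        · exact Or.inl (Or.inl h)
        · exact Or.inl (Or.inr rfl)
        · exact absurd hsw hs
        · exact Or.inr ⟨imp, hmem, Or.inl rfl⟩
        · exact Or.inr ⟨imp, hmem, Or.inr ⟨hsw, rfl⟩⟩

theorem pv_src_iff (imp p : String) :
    (PySem.Str.startswith imp "src." = true ∧ PySem.Str.slice imp (some 4) none = p)
      ↔ imp = "src." ++ p := by
  have htl : (PySem.Str.slice imp (some 4) none).toList = imp.toList.drop 4 := by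
    rw [PySem.Str.toList_slice, PySem.Chars.slice_eq_listSlice,
      PySem.List.slice_from _ (by norm_num)]
    rfl
  constructor
  · rintro ⟨hs, rfl⟩
    apply String.toList_inj.mp
    rw [PySem.Str.startswith_eq, PySem.Chars.startswith_iff] at hs
    obtain ⟨t, ht⟩ := hs
    rw [String.toList_append, htl]
    rw [show ("src.":String).toList = ['s','r','c','.'] from rfl] at ht ⊢
    rw [← ht]
    rfl
  · rintro rfl
    constructor
    · rw [PySem.Str.startswith_eq, PySem.Chars.startswith_iff, String.toList_append]
      exact List.prefix_append _ _
    · apply String.toList_inj.mp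
      rw [htl, String.toList_append]
      rfl

theorem pv_any_drop {α : Type} (l : List α) (n : Nat) (q : α → Bool) :
    (l.drop n).any q = true ↔ ∃ i, n ≤ i ∧ ∃ h : i < l.length, q (l[i]) = true := by
  rw [List.any_eq_true]
  constructor
  · rintro ⟨x, hx, hq⟩
    obtain ⟨i, hi, rfl⟩ := List.mem_iff_getElem.mp hx
    rw [List.getElem_drop] at hq
    have hlen : n + i < l.length := by
      have := hi; simp [List.length_drop] at this; omega
    exact ⟨n + i, Nat.le_add_right _ _, hlen, by simpa using hq⟩
  · rintro ⟨i, hni, hi, hq⟩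
    refine ⟨l[i], ?_, hq⟩
    have hlt : i - n < (l.drop n).length := by simp [List.length_drop]; omega
    refine List.mem_iff_getElem.mpr ⟨i - n, hlt, ?_⟩
    rw [List.getElem_drop]
    congr 1; omega

theorem pv_child_iff (parts : List String) (K : Nat) (hK : K + 1 = parts.length)
    (imp : String) (j : Nat) (hj : j < K) :
    ((j : Int) < pvDCount imp ((List.range K).map (pvF parts))
      ↔ PySem.Str.startswith imp (pvF parts j ++ ".") = true) := by
  rw [pv_dcount_eq, Nat.cast_lt]
  have hjl : j < ((List.range K).map (pvF parts)).length := by simpa using hj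
  rw [pv_takeWhile_mem _ _ ?_ j hjl]
  · simp
  · intro a b hab hb hc
    simp only [List.getElem_map, List.getElem_range] at hc ⊢
    rw [PySem.Str.startswith_eq, PySem.Chars.startswith_iff] at hc ⊢
    refine List.IsPrefix.trans ?_ hc
    exact pv_pref_mono parts a b hab (by simp at hb; omega)



theorem pvF_def (parts : List String) (j : Nat) :
    pvF parts j = PySem.Str.join "." (parts.take (j + 1)) := rfl

theorem pv_present_iff (m : String) (prefixes imps : List String) (p : String) :
    PySem.Set.contains (imps.foldl (pvScanStep m prefixes) (0, PySem.Set.empty)).2 p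
      = (imps.contains p || imps.contains ("src." ++ p)) := by
  rw [Bool.eq_iff_iff, PySem.Set.contains_iff, pv_scan_snd]
  simp only [PySem.Set.empty, List.not_mem_nil, false_or, pv_src_iff, Bool.or_eq_true,
    List.contains_iff_mem]
  constructor
  · rintro ⟨imp, hmem, rfl | rfl⟩
    · exact Or.inl hmem
    · exact Or.inr hmem
  · rintro (h | h)
    · exact ⟨p, h, Or.inl rfl⟩
    · exact ⟨_, h, Or.inr rfl⟩

theorem pv_main (module_name : String) (all_imports : List String) :
    check_parent_imported_py module_name all_imports
      = check_parent_imported_py_alt module_name all_imports := by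
  unfold check_parent_imported_py check_parent_imported_py_alt
  simp only [pv_prefixes_eq]
  rcases hK : ((PySem.Str.split? module_name ".").getD []).length with _ | K
  · -- no candidate parents: both sides are false
    rw [List.length_eq_zero_iff] at hK
    rw [hK]
    simp only [Nat.cast_zero, zero_sub, Nat.zero_sub, List.range_zero, List.map_nil]
    rw [show PySem.List.pyRange 0 (-1) 1 = [] from by decide]
    simp [PySem.List.slice]
  · set parts := (PySem.Str.split? module_name ".").getD [] with hparts
    simp only [Nat.add_sub_cancel]
    rw [show ((K + 1 : Nat) : Int) - 1 = (K : Int) from by push_cast; ring,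
      PySem.List.pyRange_zero_natCast, List.any_map]
    set st := all_imports.foldl
      (pvScanStep module_name ((List.range K).map (pvF parts))) (0, PySem.Set.empty) with hst
    have hD0 : 0 ≤ st.1 := by
      rw [hst]
      have := (pv_scan_fst module_name ((List.range K).map (pvF parts)) all_imports 0
        PySem.Set.empty (-1)).mpr (Or.inl (by norm_num))
      omega
    rw [PySem.List.slice_from _ hD0]
    rw [Bool.eq_iff_iff, List.any_eq_true, pv_any_drop]
    simp only [List.mem_range, Function.comp_apply, List.length_map, List.length_range,
      List.getElem_map, List.getElem_range]
    have hslice : ∀ j : Nat, PySem.List.slice parts none (some ((j : Int) + 1)) = parts.take (j + 1) := by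
      intro j
      rw [show ((j : Int) + 1) = ((j + 1 : Nat) : Int) from by push_cast; ring,
        PySem.List.slice_to _ (by positivity)]
      simp
    have hchild_iff : ∀ j : Nat, j < K →
        (hasSpecificChildImports_py (pvF parts j) module_name all_imports = true ↔ (j : Int) < st.1) := by
      intro j hj
      rw [hst, pv_scan_fst]
      unfold hasSpecificChildImports_py
      rw [List.any_eq_true]
      constructor
      · rintro ⟨imp, hmem, hb⟩
        simp only [Bool.and_eq_true, bne_iff_ne] at hb
        exact Or.inr ⟨imp, hmem, hb.2, (pv_child_iff parts K (by omega) imp j hj).mpr hb.1⟩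
      · rintro (h | ⟨imp, hmem, hne, hlt⟩)
        · omega
        · exact ⟨imp, hmem, by
            simp only [Bool.and_eq_true, bne_iff_ne]
            exact ⟨(pv_child_iff parts K (by omega) imp j hj).mp hlt, hne⟩⟩
    constructor
    · rintro ⟨j, hjK, hj⟩
      simp only [hslice j, Bool.and_eq_true, Bool.or_eq_true, Bool.not_eq_eq_eq_not,
        Bool.not_true] at hj
      obtain ⟨hpres, hchild⟩ := hj
      have hchild' : hasSpecificChildImports_py (pvF parts j) module_name all_imports = false := by
        rw [pvF_def]; exact hchild
      have hnotlt : ¬ ((j : Int) < st.1) := fun hlt =>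
        Bool.false_ne_true (hchild' ▸ (hchild_iff j hjK).mpr hlt)
      refine ⟨j, by omega, hjK, ?_⟩
      show PySem.Set.contains st.2 (pvF parts j) = true
      rw [hst, pv_present_iff, pvF_def, Bool.or_eq_true]
      exact hpres
    · rintro ⟨i, hni, hiK, hcont⟩
      refine ⟨i, hiK, ?_⟩
      rw [hslice i, Bool.and_eq_true, ← pvF_def]
      constructor
      · rw [hst, pv_present_iff, pvF_def] at hcont
        rw [pvF_def, Bool.or_eq_true]
        exact Bool.or_eq_true _ _ |>.mp hcont
      · rw [Bool.not_eq_eq_eq_not, Bool.not_true]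
        rw [Bool.eq_false_iff]
        intro hch
        have hlt := (hchild_iff i hiK).mp hch
        omega

-- ===== VERDICT =====
theorem check_parent_imported_py_spec : Claim_equal_check_parent_imported_py := by
  intro module_name all_imports _
  unfold Spec_check_parent_imported_py
  exact pv_main module_name all_imports
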